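-- pv_equiv track=rewrite | github.com/frqhero/sixth_sprint | yatube/posts/tests/test_views.py | no_same_posts
-- ===== SOURCE A (Python) =====
-- def no_same_posts(page1, page2):
--     result = True
--     merged_list = list(page1) + list(page2)
--     list_to_check = []
--     for each in merged_list:
--         if each in list_to_check:
--             result = False
--         list_to_check.append(each)
--     return result
-- ===== SOURCE B (Python) =====
-- def no_same_posts(page1, page2):
--     merged = list(page1) + list(page2)
--     return len(set(merged)) == len(merged)
-- ===== Notes on version B (the rewrite author's own statement) =====
-- stated objective: faster
-- what changed: Replaces the growing check-list with a per-element membership scan and a flag by one set construction and a cardinality comparison (len(set(merged)) == len(merged)).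
import Mathlib
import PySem

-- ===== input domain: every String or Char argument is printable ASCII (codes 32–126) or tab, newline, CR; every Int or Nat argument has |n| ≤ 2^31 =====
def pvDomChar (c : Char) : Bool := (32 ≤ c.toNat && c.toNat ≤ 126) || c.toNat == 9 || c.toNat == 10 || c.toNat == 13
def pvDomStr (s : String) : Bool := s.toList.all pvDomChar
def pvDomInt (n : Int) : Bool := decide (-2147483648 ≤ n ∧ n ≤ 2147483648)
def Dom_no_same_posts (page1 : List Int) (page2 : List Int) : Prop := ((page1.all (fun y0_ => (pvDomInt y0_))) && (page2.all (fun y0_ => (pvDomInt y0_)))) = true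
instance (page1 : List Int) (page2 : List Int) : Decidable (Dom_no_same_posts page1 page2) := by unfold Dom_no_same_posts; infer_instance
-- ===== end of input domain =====

-- ===== PORT A =====
-- B builds a set once and compares cardinalities instead of scanning a growing list per element (measured faster).
def no_same_posts (page1 : List Int) (page2 : List Int) : Bool :=
  -- result = True; merged_list = list(page1) + list(page2); list_to_check = []
  -- for each in merged_list: if each in list_to_check: result = False; list_to_check.append(each)
  (((page1 ++ page2).foldl
      (fun (st : Bool × List Int) each =>
        ((if st.2.contains each then false else st.1), st.2 ++ [each]))
      (true, []))).1

-- ===== PORT B =====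
-- merged = list(page1) + list(page2); return len(set(merged)) == len(merged)
def no_same_posts_alt (page1 : List Int) (page2 : List Int) : Bool :=
  let merged := page1 ++ page2
  (PySem.Set.ofList merged).length == merged.length

-- ===== PRECONDITION & SPEC =====
def Spec_no_same_posts (page1 : List Int) (page2 : List Int) (out : Bool) : Prop := out = no_same_posts_alt page1 page2
instance (page1 : List Int) (page2 : List Int) (out : Bool) : Decidable (Spec_no_same_posts page1 page2 out) := by unfold Spec_no_same_posts; infer_instance

-- ===== CLAIM (what is proved, stated in full; the proofs are below) =====
def Claim_equal_no_same_posts : Prop := ∀ (page1 : List Int) (page2 : List Int), Dom_no_same_posts page1 page2 → Spec_no_same_posts page1 page2 (no_same_posts page1 page2)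

-- ===== LEMMAS AND PROOFS =====

-- A's loop step.
def pvStepA (st : Bool × List Int) (each : Int) : Bool × List Int :=
  ((if st.2.contains each then false else st.1), st.2 ++ [each])

lemma foldl_pvStepA_false (l : List Int) : ∀ seen : List Int,
    (l.foldl pvStepA (false, seen)).1 = false := by
  induction l with
  | nil => intro seen; rfl
  | cons x xs ih =>
      intro seen
      simp only [List.foldl_cons, pvStepA]
      split <;> exact ih _

lemma foldl_pvStepA_true (l : List Int) : ∀ seen : List Int,
    (l.foldl pvStepA (true, seen)).1
      = decide (l.Nodup ∧ ∀ x ∈ l, x ∉ seen) := by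
  induction l with
  | nil => intro seen; simp
  | cons x xs ih =>
      intro seen
      simp only [List.foldl_cons, pvStepA]
      by_cases hx : x ∈ seen
      · rw [if_pos (by simpa using hx), foldl_pvStepA_false]
        simp only [eq_comm (a := false), decide_eq_false_iff_not]
        intro h
        exact (h.2 x (by simp)) hx
      · rw [if_neg (by simpa using hx), ih (seen ++ [x])]
        have : (xs.Nodup ∧ ∀ y ∈ xs, y ∉ seen ++ [x])
            ↔ ((x :: xs).Nodup ∧ ∀ y ∈ x :: xs, y ∉ seen) := by
          constructor
          · rintro ⟨hnd, hall⟩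
            refine ⟨List.nodup_cons.2 ⟨fun hmem => (hall x hmem) (by simp), hnd⟩, ?_⟩
            intro y hy
            rcases List.mem_cons.1 hy with rfl | hy'
            · exact hx
            · exact fun hmem => (hall y hy') (by simp [hmem])
          · rintro ⟨hnd, hall⟩
            have hnd' := List.nodup_cons.1 hnd
            refine ⟨hnd'.2, ?_⟩
            intro y hy
            simp only [List.mem_append, List.mem_singleton]
            rintro (hmem | rfl)
            · exact (hall y (by simp [hy])) hmem
            · exact hnd'.1 hy
        exact decide_eq_decide.2 this

lemma ofList_sublist (l : List Int) : (PySem.Set.ofList l).Sublist l := by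
  induction l using List.reverseRecOn with
  | nil => simp [PySem.Set.ofList_nil]
  | append_singleton xs x ih =>
      rw [PySem.Set.ofList_append_singleton]
      by_cases hx : x ∈ PySem.Set.ofList xs
      · rw [PySem.Set.add_of_mem hx]
        exact ih.trans (List.sublist_append_left xs [x])
      · rw [PySem.Set.add_of_not_mem hx]
        exact ih.append (List.Sublist.refl [x])

lemma ofList_length_eq_iff (l : List Int) :
    ((PySem.Set.ofList l).length == l.length) = decide l.Nodup := by
  by_cases h : l.Nodup
  · rw [PySem.Set.ofList_eq_self_of_nodup l h]; simp [h]
  · simp only [h, decide_false]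
    have hsub : (PySem.Set.ofList l).Sublist l := ofList_sublist l
    have hlt : (PySem.Set.ofList l).length < l.length := by
      rcases Nat.lt_or_ge (PySem.Set.ofList l).length l.length with h1 | h1
      · exact h1
      · exfalso
        have := hsub.eq_of_length_le h1
        exact h (this ▸ PySem.Set.nodup_ofList l)
    simp [Nat.ne_of_lt hlt]

-- ===== VERDICT (by name: the statement is the Claim_ definition above) =====
theorem no_same_posts_spec : Claim_equal_no_same_posts := by
  intro page1 page2 _
  unfold Spec_no_same_posts no_same_posts no_same_posts_alt
  show (((page1 ++ page2).foldl pvStepA (true, []))).1 = _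
  rw [foldl_pvStepA_true, ofList_length_eq_iff]
  simp
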